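-- pv_equiv track=rewrite | github.com/mpospirit/google_foobar_challange | 4.1_free_the_bunny_workers.py | solution
-- ===== SOURCE A (Python) =====
-- from itertools import combinations
--
-- def solution(num_buns, num_required):
--     # Tricky part is to figure out how many copies of each key to give to the bunnies
--     replicas = num_buns - num_required + 1
--
--     key_pairs = list(combinations(range(num_buns), replicas))
--
--     # Creating a dictionary to store the keys for each bunny
--     keys = {}
--     for i in range(num_buns):
--         keys[i] = []
--
--     # Assigning the keys to the bunnies
--     for i in range(len(key_pairs)):
--         for j in key_pairs[i]:
--             keys[j].append(i)
--
--     # Creating a list of the keys for each bunny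
--     key_list = []
--     for i in range(num_buns):
--         key_list.append(keys[i])
--
--     return key_list
-- ===== SOURCE B (Python) =====
-- from itertools import combinations
--
-- def solution(num_buns, num_required):
--     replicas = num_buns - num_required + 1
--     combos = list(combinations(range(num_buns), replicas))
--     # gather: for each bunny, scan the combinations once and keep the
--     # indices of those that contain it (enumerate yields increasing indices)
--     return [[i for i, combo in enumerate(combos) if b in combo]
--             for b in range(num_buns)]
-- ===== Notes on version B (the rewrite author's own statement) =====
-- stated objective: simpler
-- what changed: Replaces A's scatter (init a dict of empty lists, loop over indexed combinations appending each index to every member bunny, then flatten the dict back into a list) by a gather: one comprehension that, for each bunny, filters the enumerated combinations by membership; the dict and the two extra loops disappear.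
import Mathlib
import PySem

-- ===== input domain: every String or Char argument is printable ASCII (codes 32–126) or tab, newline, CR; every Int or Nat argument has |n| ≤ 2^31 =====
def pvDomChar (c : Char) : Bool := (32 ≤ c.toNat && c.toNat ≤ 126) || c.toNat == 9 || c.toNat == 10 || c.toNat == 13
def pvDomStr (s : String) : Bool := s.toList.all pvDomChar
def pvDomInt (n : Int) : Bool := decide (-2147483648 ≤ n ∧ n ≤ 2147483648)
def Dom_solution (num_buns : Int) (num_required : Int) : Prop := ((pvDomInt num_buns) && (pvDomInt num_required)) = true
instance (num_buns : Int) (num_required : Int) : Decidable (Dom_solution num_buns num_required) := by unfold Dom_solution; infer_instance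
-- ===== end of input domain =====

-- B replaces A's dict-based scatter over indexed combinations by a per-bunny gather
-- (membership filter over the enumerated combinations): simpler, no intermediate dict.


-- itertools.combinations(xs, r) in lexicographic order (shared: both Pythons call it).
-- Python raises ValueError for r < 0; the ports receive r as a Nat and Pre_ excludes r < 0.
def pyCombinations : List Int → Nat → List (List Int)
  | _, 0 => [[]]
  | [], _ + 1 => []
  | x :: xs, r + 1 =>
    -- itertools short-circuits: combinations(p, r) is empty when r > len(p)
    if xs.length + 1 < r + 1 then []
    else (pyCombinations xs r).map (x :: ·) ++ pyCombinations xs (r + 1)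

-- ===== PORT A =====
-- 'keys[j].append(i)' / 'keys[i]': the key is always present (j, i ∈ range(num_buns)),
-- so Dict.modify/getD with default [] is exact here.
def solution (num_buns : Int) (num_required : Int) : List (List Int) :=
  let replicas := num_buns - num_required + 1
  let key_pairs := pyCombinations (PySem.List.pyRange 0 num_buns 1) replicas.toNat
  let keys0 : PySem.Dict Int (List Int) :=
    (PySem.List.pyRange 0 num_buns 1).foldl (fun d i => d.insert i []) PySem.Dict.empty
  let keys :=
    (PySem.List.pyRange 0 (key_pairs.length) 1).foldl
      (fun d i => (PySem.List.pyGetD key_pairs i []).foldl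
        (fun d j => d.modify j [] (· ++ [i])) d) keys0
  (PySem.List.pyRange 0 num_buns 1).map (fun i => keys.getD i [])

-- ===== PORT B =====
def solution_alt (num_buns : Int) (num_required : Int) : List (List Int) :=
  let replicas := num_buns - num_required + 1
  let combos := pyCombinations (PySem.List.pyRange 0 num_buns 1) replicas.toNat
  (PySem.List.pyRange 0 num_buns 1).map (fun b =>
    (PySem.List.enumerate combos 0).filterMap (fun p => if b ∈ p.2 then some p.1 else none))

-- ===== PRECONDITION & SPEC =====
-- Pre_ excludes exactly the inputs where replicas = num_buns - num_required + 1 < 0,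
-- on which A (and B) raise ValueError in combinations.
def Pre_solution (num_buns : Int) (num_required : Int) : Prop :=
  0 ≤ num_buns - num_required + 1
instance (num_buns : Int) (num_required : Int) : Decidable (Pre_solution num_buns num_required) := by
  unfold Pre_solution; infer_instance

def pvWitness_solution : Int × Int := (4, 2)

def Spec_solution (num_buns : Int) (num_required : Int) (out : List (List Int)) : Prop :=
  out = solution_alt num_buns num_required
instance (num_buns : Int) (num_required : Int) (out : List (List Int)) : Decidable (Spec_solution num_buns num_required out) := by unfold Spec_solution; infer_instance

-- ===== CLAIM (what is proved, stated in full; the proofs are below) =====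
def Claim_equal_solution : Prop := ∀ (num_buns : Int) (num_required : Int), Dom_solution num_buns num_required → Pre_solution num_buns num_required → Spec_solution num_buns num_required (solution num_buns num_required)

-- ===== LEMMAS AND PROOFS =====

-- every member of pyCombinations xs r is a sublist of xs
theorem mem_pyCombinations_sublist : ∀ (xs : List Int) (r : Nat) (c : List Int),
    c ∈ pyCombinations xs r → c.Sublist xs := by
  intro xs
  induction xs with
  | nil =>
    intro r c hc
    cases r with
    | zero => simp [pyCombinations] at hc; simp [hc]
    | succ r => simp [pyCombinations] at hc
  | cons x xs ih =>
    intro r c hc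
    cases r with
    | zero => simp [pyCombinations] at hc; simp [hc]
    | succ r =>
      simp only [pyCombinations] at hc
      split_ifs at hc with hlen
      · simp at hc
      simp only [List.mem_append, List.mem_map] at hc
      rcases hc with ⟨c', hc', rfl⟩ | hc
      · exact (ih r c' hc').cons₂ x
      · exact (ih (r + 1) c hc).cons x

-- the initialisation loop maps every key to []
theorem getD_init_nil : ∀ (xs : List Int) (d : PySem.Dict Int (List Int)) (b : Int),
    d.getD b [] = [] → ((xs.foldl (fun d i => d.insert i []) d).getD b []) = [] := by
  intro xs
  induction xs with
  | nil => intro d b h; simpa using h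
  | cons x xs ih =>
    intro d b h
    refine ih _ b ?_
    rw [PySem.Dict.getD_insert]
    split_ifs with hb
    · rfl
    · exact h

-- inner loop: appending i at every j ∈ c appends [i] at b iff b ∈ c (c has no duplicates)
theorem getD_inner_scatter (c : List Int) (i b : Int) (d : PySem.Dict Int (List Int))
    (hnd : c.Nodup) :
    ((c.foldl (fun d j => d.modify j [] (· ++ [i])) d).getD b []) =
      d.getD b [] ++ (if b ∈ c then [i] else []) := by
  have h1 : (c.foldl (fun d j => d.modify j [] (· ++ [i])) d)
      = ((c.map (fun j => (j, i))).foldl (fun d p => d.modify p.1 [] (· ++ [p.2])) d) := by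
    rw [List.foldl_map]
  rw [h1, PySem.Dict.getD_foldl_modify_append]
  congr 1
  have h2 : ((c.map (fun j => (j, i))).filter (fun p => p.1 == b))
      = (c.filter (fun j => j == b)).map (fun j => (j, i)) := by
    rw [List.filter_map]; rfl
  rw [h2, List.map_map]
  by_cases hb : b ∈ c
  · have hfilter : c.filter (fun j => j == b) = [b] := by
      have hc1 : (c.filter (fun j => j == b)).length = 1 := by
        rw [← List.count_eq_length_filter]
        have h1 := List.nodup_iff_count_le_one.mp hnd b
        have h2 := (List.count_pos_iff).mpr hb
        omega
      rcases h : c.filter (fun j => j == b) with _ | ⟨y, ys⟩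
      · rw [h] at hc1; simp at hc1
      · rw [h] at hc1
        have hmem : y ∈ c.filter (fun j => j == b) := by
          rw [h]; exact List.mem_cons_self ..
        have hy := List.of_mem_filter hmem
        simp at hc1 hy
        subst hy; simp [hc1]
    simp [hfilter, hb]
  · have hfilter : c.filter (fun j => j == b) = [] := by
      simp only [List.filter_eq_nil_iff]
      intro a ha
      simp
      rintro rfl; exact hb ha
    simp [hfilter, hb]

-- outer loop over enumerated combinations
theorem getD_scatter : ∀ (l : List (Int × List Int)) (d : PySem.Dict Int (List Int)) (b : Int),
    (∀ p ∈ l, (p.2 : List Int).Nodup) →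
    ((l.foldl (fun d p => (p.2).foldl (fun d j => d.modify j [] (· ++ [p.1])) d) d).getD b []) =
      d.getD b [] ++ l.filterMap (fun p => if b ∈ p.2 then some p.1 else none) := by
  intro l
  induction l with
  | nil => intro d b _; simp
  | cons p l ih =>
    intro d b hnd
    simp only [List.foldl_cons, List.filterMap_cons]
    rw [ih _ b (fun q hq => hnd q (List.mem_cons_of_mem _ hq)),
        getD_inner_scatter p.2 p.1 b d (hnd p (List.mem_cons_self ..))]
    split_ifs with hb <;> simp

-- A's index loop over range(len(kp)) with kp[i] is the fold over enumerate(kp)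
theorem foldl_range_index_eq_enumerate :
    ∀ (kp : List (List Int)) (d : PySem.Dict Int (List Int)),
    ((PySem.List.pyRange 0 (kp.length) 1).foldl
        (fun d i => (PySem.List.pyGetD kp i []).foldl
          (fun d j => d.modify j [] (· ++ [i])) d) d) =
      ((PySem.List.enumerate kp 0).foldl
        (fun d p => (p.2).foldl (fun d j => d.modify j [] (· ++ [p.1])) d) d) := by
  intro kp
  induction kp using List.reverseRecOn with
  | nil => intro d; simp
  | append_singleton ys y ih =>
    intro d
    have hlen : ((ys ++ [y]).length : Int) = (ys.length : Int) + 1 := by simp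
    rw [hlen, PySem.List.pyRange_one_succ_right (by positivity), List.foldl_append]
    have henum : PySem.List.enumerate (ys ++ [y]) 0
        = PySem.List.enumerate ys 0 ++ [((ys.length : Int), y)] := by
      have := PySem.List.enumerate_append (xs := ys) (ys := [y]) (s := 0)
      simpa using this
    rw [henum, List.foldl_append]
    have hcong : ((PySem.List.pyRange 0 (ys.length) 1).foldl
        (fun d i => (PySem.List.pyGetD (ys ++ [y]) i []).foldl
          (fun d j => d.modify j [] (· ++ [i])) d) d)
        = ((PySem.List.pyRange 0 (ys.length) 1).foldl
        (fun d i => (PySem.List.pyGetD ys i []).foldl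
          (fun d j => d.modify j [] (· ++ [i])) d) d) := by
      apply PySem.List.foldl_congr_mem
      intro acc i hi
      rw [PySem.List.mem_pyRange_one] at hi
      have h0 : PySem.List.pyGetD (ys ++ [y]) i [] = PySem.List.pyGetD ys i [] := by
        rw [PySem.List.pyGetD_eq_getElem _ _ hi.1 (by simp; omega),
            PySem.List.pyGetD_eq_getElem _ _ hi.1 (by omega)]
        exact List.getElem_append_left (by omega)
      rw [h0]
    rw [hcong, ih]
    simp only [List.foldl_cons, List.foldl_nil]
    congr 1
    · rw [PySem.List.pyGetD_eq_getElem _ _ (by positivity) (by simp)]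
      simp

-- ===== VERDICT (by name: the statement is the Claim_ definition above) =====
theorem solution_spec : Claim_equal_solution := by
  intro num_buns num_required _ _
  unfold Spec_solution solution solution_alt
  simp only []
  apply List.map_congr_left
  intro b hb
  set kp := pyCombinations (PySem.List.pyRange 0 num_buns 1)
      (num_buns - num_required + 1).toNat with hkp
  rw [foldl_range_index_eq_enumerate]
  rw [getD_scatter]
  · rw [getD_init_nil _ PySem.Dict.empty b (by simp)]
    simp
  · intro p hp
    have hsnd : p.2 ∈ kp := by
      have := PySem.List.map_snd_enumerate (xs := kp) (s := 0)
      rw [← this]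
      exact List.mem_map_of_mem hp
    exact List.Sublist.nodup (mem_pyCombinations_sublist _ _ _ hsnd)
      (PySem.List.nodup_pyRange_one 0 num_buns)
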